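-- pv_equiv track=rewrite | github.com/andrejmaznin/rest-yandex | data/checks.py | check_hours
-- ===== SOURCE A (Python) =====
-- def check_hours(hours):
--     if hours.__class__.__name__ != "list":
--         return False
--     for h in hours:
--         if h.__class__.__name__ != "str":
--             return False
--         if not (h[0].isdigit() and h[1].isdigit() and h[2] == ':' and h[3].isdigit() and h[4].isdigit() and h[
--             5] == '-' and h[6].isdigit() and h[7].isdigit() and h[8] == ':' and h[9].isdigit() and h[
--                     10].isdigit()) or len(h) != 11:
--             return False
--     return True
-- ===== SOURCE B (Python) =====
-- def check_hours(hours):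
--     if hours.__class__.__name__ != "list":
--         return False
--     pattern = "dd:dd-dd:dd"
--     for h in hours:
--         if h.__class__.__name__ != "str" or len(h) != len(pattern):
--             return False
--         for c, p in zip(h, pattern):
--             if not (c.isdigit() if p == 'd' else c == p):
--                 return False
--     return True
-- ===== Notes on version B (the rewrite author's own statement) =====
-- stated objective: idiomatic
-- what changed: Replaces the unrolled 11-term boolean index chain with a data-driven scan: each string is checked against the pattern table 'dd:dd-dd:dd' position by position (length checked first, so no indexing can go out of range).
import Mathlib
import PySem

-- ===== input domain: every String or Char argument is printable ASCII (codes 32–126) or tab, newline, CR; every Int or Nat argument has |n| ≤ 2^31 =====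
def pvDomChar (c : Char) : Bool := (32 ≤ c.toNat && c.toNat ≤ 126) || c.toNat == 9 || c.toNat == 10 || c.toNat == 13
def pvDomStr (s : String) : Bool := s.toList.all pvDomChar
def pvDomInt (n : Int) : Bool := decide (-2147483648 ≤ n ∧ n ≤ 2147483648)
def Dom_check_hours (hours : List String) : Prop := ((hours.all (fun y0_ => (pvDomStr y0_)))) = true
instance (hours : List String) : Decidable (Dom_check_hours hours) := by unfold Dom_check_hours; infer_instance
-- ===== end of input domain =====

-- B replaces A's unrolled 11-term boolean index chain with a length check followed by a
-- position-by-position scan against the pattern table "dd:dd-dd:dd" (idiomatic, same cost).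
-- The `.__class__` type guards of the Python sources are enforced by the Lean types and drop out.

-- ===== PORT A =====
-- h[i] for the literal non-negative indices 0..10: List.getD with a default.
-- Exact wherever the index is in range; an out-of-range access raises IndexError in
-- Python, and exactly those inputs are excluded by Pre_check_hours below.
def pvDget (l : List Char) (i : Nat) : Char := l.getD i ' '

-- the unrolled `h[0].isdigit() and h[1].isdigit() and h[2] == ':' and …` chain
def pvChainA (h : List Char) : Bool :=
  PySem.Chars.isdigit (pvDget h 0) && PySem.Chars.isdigit (pvDget h 1) &&
  (pvDget h 2 == ':') && PySem.Chars.isdigit (pvDget h 3) && PySem.Chars.isdigit (pvDget h 4) &&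
  (pvDget h 5 == '-') && PySem.Chars.isdigit (pvDget h 6) && PySem.Chars.isdigit (pvDget h 7) &&
  (pvDget h 8 == ':') && PySem.Chars.isdigit (pvDget h 9) && PySem.Chars.isdigit (pvDget h 10)

def pvGoA : List String → Bool
  | [] => true
  | h :: t =>
    if !(pvChainA h.toList) || h.toList.length ≠ 11 then false else pvGoA t

def check_hours (hours : List String) : Bool := pvGoA hours

-- ===== PORT B =====
def pvPattern : List Char := ['d', 'd', ':', 'd', 'd', '-', 'd', 'd', ':', 'd', 'd']

def pvPosOK (c : Char) (p : Char) : Bool :=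
  if p == 'd' then PySem.Chars.isdigit c else c == p

-- the inner `for c, p in zip(h, pattern): if not …: return False` loop
def pvScan (h : List Char) : Bool :=
  (h.zip pvPattern).all (fun cp => pvPosOK cp.1 cp.2)

def pvCheckOne (h : List Char) : Bool :=
  (h.length == pvPattern.length) && pvScan h

def check_hours_alt (hours : List String) : Bool :=
  hours.all (fun h => pvCheckOne h.toList)

-- ===== PRECONDITION & SPEC =====
-- Python A raises IndexError exactly when the scan reaches an element shorter than 11
-- characters whose whole prefix matches the pattern (every earlier element passed the
-- full check); Pre_ excludes exactly those inputs and nothing else.  (B, which checks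
-- the length before indexing, simply returns false on such inputs.)
def pvRaising (h : List Char) : Bool := (h.length < 11 : Bool) && pvScan h

def Pre_check_hours (hours : List String) : Prop :=
  ¬ ∃ k < hours.length, pvRaising ((hours.getD k "").toList) = true ∧
      ∀ i < k, pvCheckOne ((hours.getD i "").toList) = true
instance (hours : List String) : Decidable (Pre_check_hours hours) := by
  unfold Pre_check_hours; infer_instance

def pvWitness_check_hours : List String := ["12:34-56:78"]

def Spec_check_hours (hours : List String) (out : Bool) : Prop := out = check_hours_alt hours
instance (hours : List String) (out : Bool) : Decidable (Spec_check_hours hours out) := by unfold Spec_check_hours; infer_instance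

-- ===== CLAIM (what is proved, stated in full; the proofs are below) =====
def Claim_equal_check_hours : Prop := ∀ (hours : List String), Dom_check_hours hours → Pre_check_hours hours → Spec_check_hours hours (check_hours hours)

-- ===== LEMMAS AND PROOFS =====

-- per-element agreement: A's chain-and-length test equals B's length-and-scan test
theorem pv_elem_eq (l : List Char) :
    (pvChainA l && !(decide (l.length ≠ 11))) = pvCheckOne l := by
  rcases l with _ | ⟨c0, _ | ⟨c1, _ | ⟨c2, _ | ⟨c3, _ | ⟨c4, _ | ⟨c5, _ | ⟨c6, _ | ⟨c7, _ | ⟨c8, _ | ⟨c9, _ | ⟨c10, rest⟩⟩⟩⟩⟩⟩⟩⟩⟩⟩⟩ <;>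
    simp [pvChainA, pvCheckOne, pvScan, pvPattern, pvPosOK, pvDget, List.zip, List.zipWith]
  cases rest with
  | nil => simp [Bool.and_assoc]
  | cons c11 rest => simp

theorem pv_go_eq (hours : List String) :
    pvGoA hours = hours.all (fun h => pvCheckOne h.toList) := by
  induction hours with
  | nil => rfl
  | cons h t ih =>
    rw [List.all_cons, ← pv_elem_eq, ← ih]
    show (if !pvChainA h.toList || decide (h.toList.length ≠ 11) then false
          else pvGoA t) = ((pvChainA h.toList && !decide (h.toList.length ≠ 11)) && pvGoA t)
    cases hb : pvChainA h.toList <;> cases hl : decide (h.toList.length ≠ 11) <;> simp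

-- ===== VERDICT (by name: the statement is the Claim_ definition above) =====
theorem check_hours_spec : Claim_equal_check_hours := by
  intro hours _ _
  unfold Spec_check_hours check_hours check_hours_alt
  exact pv_go_eq hours
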